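-- pv_equiv track=rewrite | github.com/henryperkins/mcprag | mcprag/auth/azure_ad_auth.py | _determine_tier_from_claims
-- ===== SOURCE A (Python) =====
-- from typing import Optional, Dict, Any, Tuple
--
-- def _determine_tier_from_claims(claims: Dict[str, Any]) -> str:
--     """
--     Determine user tier from Azure AD claims.
--
--     Args:
--         claims: Token claims
--
--     Returns:
--         Security tier string
--     """
--     roles = claims.get("roles", [])
--     groups = claims.get("groups", [])
--
--     # Check for admin roles
--     admin_roles = {"Global Administrator", "Search Service Contributor", "Owner"}
--     if any(role in admin_roles for role in roles):
--         return "admin"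
--
--     # Check for developer roles
--     dev_roles = {"Search Index Data Contributor", "Contributor"}
--     if any(role in dev_roles for role in roles):
--         return "developer"
--
--     # Check for read-only roles
--     read_roles = {"Search Index Data Reader", "Reader"}
--     if any(role in read_roles for role in roles):
--         return "public"
--
--     # Default to public
--     return "public"
-- ===== SOURCE B (Python) =====
-- _ROLE_RANK = {
--     "Global Administrator": 0,
--     "Search Service Contributor": 0,
--     "Owner": 0,
--     "Search Index Data Contributor": 1,
--     "Contributor": 1,
--     "Search Index Data Reader": 2,
--     "Reader": 2,
-- }
-- _TIER_OF_RANK = ("admin", "developer", "public", "public")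
--
--
-- def _determine_tier_from_claims(claims):
--     roles = claims.get("roles", [])
--     groups = claims.get("groups", [])
--
--     best = 3  # no matching role => rank 3 => "public"
--     for role in roles:
--         rank = _ROLE_RANK.get(role, 3)
--         if rank < best:
--             best = rank
--     return _TIER_OF_RANK[best]
-- ===== Notes on version B (the rewrite author's own statement) =====
-- stated objective: idiomatic
-- what changed: Replaced A's three ordered any()-scans over roles (admin, then developer, then read-only sets) with a single pass keeping the smallest rank from one role-to-rank table, returning the tier of the best rank.
import Mathlib
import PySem

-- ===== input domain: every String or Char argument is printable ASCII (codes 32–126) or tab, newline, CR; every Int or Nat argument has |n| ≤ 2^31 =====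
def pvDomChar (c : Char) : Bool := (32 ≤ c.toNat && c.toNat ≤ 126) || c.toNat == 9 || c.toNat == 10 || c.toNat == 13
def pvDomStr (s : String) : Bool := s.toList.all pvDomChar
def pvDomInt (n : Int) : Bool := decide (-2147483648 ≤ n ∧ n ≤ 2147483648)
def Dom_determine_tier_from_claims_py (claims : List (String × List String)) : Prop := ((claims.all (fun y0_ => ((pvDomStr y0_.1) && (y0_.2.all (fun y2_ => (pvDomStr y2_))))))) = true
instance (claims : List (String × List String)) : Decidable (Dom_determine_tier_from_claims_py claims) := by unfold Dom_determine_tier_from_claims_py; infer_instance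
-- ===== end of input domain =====

-- B replaces A's three ordered any()-scans over roles by one scan keeping the best
-- (smallest) rank from a role→rank table (objective: idiomatic single pass; same cost).

-- claims.get(k, []) on the association list (first match, as for a Python dict)
def pvClaimGet (claims : List (String × List String)) (k : String) : List String :=
  ((claims.find? (fun p => p.1 == k)).map (·.2)).getD []

-- ===== PORT A =====
def determine_tier_from_claims_py (claims : List (String × List String)) : String :=
  let roles := pvClaimGet claims "roles"
  let _groups := pvClaimGet claims "groups"
  -- role in admin_roles / dev_roles / read_roles: membership in a literal set
  if roles.any (fun r => r == "Global Administrator" || r == "Search Service Contributor" || r == "Owner") then "admin"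
  else if roles.any (fun r => r == "Search Index Data Contributor" || r == "Contributor") then "developer"
  else if roles.any (fun r => r == "Search Index Data Reader" || r == "Reader") then "public"
  else "public"

-- ===== PORT B =====
def pvRoleRankDict : PySem.Dict String Nat :=
  PySem.Dict.mk
    [("Global Administrator", 0), ("Search Service Contributor", 0), ("Owner", 0),
     ("Search Index Data Contributor", 1), ("Contributor", 1),
     ("Search Index Data Reader", 2), ("Reader", 2)]

def pvTierOfRank : List String := ["admin", "developer", "public", "public"]

def determine_tier_from_claims_py_alt (claims : List (String × List String)) : String :=
  let roles := pvClaimGet claims "roles"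
  let _groups := pvClaimGet claims "groups"
  let best := roles.foldl
    (fun b r =>
      let rank := pvRoleRankDict.getD r 3
      if rank < b then rank else b) 3
  pvTierOfRank.getD best "public"

-- ===== PRECONDITION & SPEC =====
def Spec_determine_tier_from_claims_py (claims : List (String × List String)) (out : String) : Prop := out = determine_tier_from_claims_py_alt claims
instance (claims : List (String × List String)) (out : String) : Decidable (Spec_determine_tier_from_claims_py claims out) := by unfold Spec_determine_tier_from_claims_py; infer_instance

-- ===== CLAIM (what is proved, stated in full; the proofs are below) =====
def Claim_equal_determine_tier_from_claims_py : Prop := ∀ (claims : List (String × List String)), Dom_determine_tier_from_claims_py claims → Spec_determine_tier_from_claims_py claims (determine_tier_from_claims_py claims)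

-- ===== LEMMAS AND PROOFS =====

-- rank 0 exactly on admin roles, rank 1 exactly on developer roles
lemma pvRank_zero (r : String) :
    (pvRoleRankDict.getD r 3 = 0) =
      ((r == "Global Administrator" || r == "Search Service Contributor" || r == "Owner") = true) := by
  simp only [pvRoleRankDict, PySem.Dict.getD_eq_get?_getD,
    PySem.Dict.get?_mk_cons]
  by_cases h1 : r = "Global Administrator" <;> by_cases h2 : r = "Search Service Contributor" <;>
    by_cases h3 : r = "Owner" <;> by_cases h4 : r = "Search Index Data Contributor" <;>
    by_cases h5 : r = "Contributor" <;> by_cases h6 : r = "Search Index Data Reader" <;>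
    by_cases h7 : r = "Reader" <;> (simp_all [PySem.Dict.get?]; try (split_ifs <;> simp_all))

lemma pvRank_one (r : String) :
    (pvRoleRankDict.getD r 3 = 1) =
      ((r == "Search Index Data Contributor" || r == "Contributor") = true) := by
  simp only [pvRoleRankDict, PySem.Dict.getD_eq_get?_getD,
    PySem.Dict.get?_mk_cons]
  by_cases h1 : r = "Global Administrator" <;> by_cases h2 : r = "Search Service Contributor" <;>
    by_cases h3 : r = "Owner" <;> by_cases h4 : r = "Search Index Data Contributor" <;>
    by_cases h5 : r = "Contributor" <;> by_cases h6 : r = "Search Index Data Reader" <;>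
    by_cases h7 : r = "Reader" <;> (simp_all [PySem.Dict.get?]; try (split_ifs <;> simp_all))

-- the running-best loop, for any accumulator b, realises A's ordered scan
lemma pv_key (roles : List String) : ∀ b : Nat,
    pvTierOfRank.getD
      (roles.foldl (fun b r =>
        let rank := pvRoleRankDict.getD r 3
        if rank < b then rank else b) b) "public" =
    (if b = 0 ∨ roles.any (fun r => r == "Global Administrator" || r == "Search Service Contributor" || r == "Owner") then "admin"
     else if b = 1 ∨ roles.any (fun r => r == "Search Index Data Contributor" || r == "Contributor") then "developer"
     else "public") := by
  induction roles with
  | nil =>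
    intro b
    simp only [List.foldl_nil, List.any_nil, pvTierOfRank]
    match b with
    | 0 => simp
    | 1 => simp
    | 2 => simp
    | (n + 3) => simp [List.getD]
  | cons r rs ih =>
    intro b
    simp only [List.foldl_cons, List.any_cons, ih]
    by_cases hA : (r == "Global Administrator" || r == "Search Service Contributor" || r == "Owner") = true
    · have h0 : pvRoleRankDict.getD r 3 = 0 := by rw [pvRank_zero]; exact hA
      have hs : (if pvRoleRankDict.getD r 3 < b then pvRoleRankDict.getD r 3 else b) = 0 := by
        rw [h0]; split_ifs <;> omega
      simp [hs, hA]
    · by_cases hD : (r == "Search Index Data Contributor" || r == "Contributor") = true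
      · have h1 : pvRoleRankDict.getD r 3 = 1 := by rw [pvRank_one]; exact hD
        by_cases hb : b = 0
        · have hs : (if pvRoleRankDict.getD r 3 < b then pvRoleRankDict.getD r 3 else b) = 0 := by
            rw [h1]; split_ifs <;> omega
          simp [hb]
        · have hs : (if pvRoleRankDict.getD r 3 < b then pvRoleRankDict.getD r 3 else b) = 1 := by
            rw [h1]; split_ifs <;> omega
          simp [hs, hA, hD, hb]
      · have hr0 : pvRoleRankDict.getD r 3 ≠ 0 := fun h => hA ((pvRank_zero r) ▸ h)
        have hr1 : pvRoleRankDict.getD r 3 ≠ 1 := fun h => hD ((pvRank_one r) ▸ h)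
        have hs0 : ((if pvRoleRankDict.getD r 3 < b then pvRoleRankDict.getD r 3 else b) = 0) ↔ b = 0 := by
          split_ifs <;> omega
        have hs1 : ((if pvRoleRankDict.getD r 3 < b then pvRoleRankDict.getD r 3 else b) = 1) ↔ b = 1 := by
          split_ifs <;> omega
        simp [hs0, hs1, hA, hD]

-- ===== VERDICT (by name: the statement is the Claim_ definition above) =====
theorem determine_tier_from_claims_py_spec : Claim_equal_determine_tier_from_claims_py := by
  intro claims _
  unfold Spec_determine_tier_from_claims_py determine_tier_from_claims_py determine_tier_from_claims_py_alt
  rw [pv_key]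
  norm_num
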